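-- pv_equiv track=rewrite | github.com/swidoff/aoc-2018 | src/day2.py | part1
-- ===== SOURCE A (Python) =====
-- from collections import Counter
-- from typing import List
--
-- def part1(ids: List[str]) -> int:
--     count_2, count_3 = 0, 0
--     for i in ids:
--         counter = Counter(i)
--         if 2 in counter.values():
--             count_2 += 1
--         if 3 in counter.values():
--             count_3 += 1
--
--     return count_2 * count_3
-- ===== SOURCE B (Python) =====
-- from itertools import groupby
-- from typing import List
--
-- def part1(ids: List[str]) -> int:
--     count_2, count_3 = 0, 0
--     for s in ids:
--         run_lengths = {len(list(g)) for _, g in groupby(sorted(s))}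
--         count_2 += 2 in run_lengths
--         count_3 += 3 in run_lengths
--     return count_2 * count_3
-- ===== Notes on version B (the rewrite author's own statement) =====
-- stated objective: idiomatic
-- what changed: Replaces the hash-based Counter frequency table with sorting each id and scanning consecutive equal runs via itertools.groupby, collecting run lengths into a set and testing 2/3 membership.
import Mathlib
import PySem

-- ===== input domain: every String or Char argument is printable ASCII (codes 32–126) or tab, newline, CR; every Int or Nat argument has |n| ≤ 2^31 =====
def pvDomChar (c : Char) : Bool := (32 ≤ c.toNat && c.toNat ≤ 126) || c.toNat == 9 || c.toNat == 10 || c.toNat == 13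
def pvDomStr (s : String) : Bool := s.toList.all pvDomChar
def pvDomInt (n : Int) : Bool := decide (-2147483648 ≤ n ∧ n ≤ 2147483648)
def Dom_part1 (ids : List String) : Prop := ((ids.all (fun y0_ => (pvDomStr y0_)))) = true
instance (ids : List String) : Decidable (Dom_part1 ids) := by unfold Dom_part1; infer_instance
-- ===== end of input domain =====

-- B replaces A's Counter frequency table with sorting each id and scanning consecutive equal runs (groupby run lengths); idiomatic alternative, same results.


-- ===== PORT A =====
def part1 (ids : List String) : Int :=
  let p := ids.foldl (fun (p : Int × Int) i =>
    let counter := PySem.Dict.counter i.toList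
    let c2 := if (2 : Int) ∈ counter.values then p.1 + 1 else p.1
    let c3 := if (3 : Int) ∈ counter.values then p.2 + 1 else p.2
    (c2, c3)) (0, 0)
  p.1 * p.2

-- ===== PORT B =====
-- run lengths of consecutive equal elements: the lengths that itertools.groupby yields
def runLens : List Char → List Nat
  | [] => []
  | c :: rest =>
    ((rest.takeWhile (· == c)).length + 1) :: runLens (rest.dropWhile (· == c))
termination_by l => l.length
decreasing_by
  have := List.length_dropWhile_le (fun x => x == c) rest
  simp; omega

def part1_alt (ids : List String) : Int :=
  let p := ids.foldl (fun (p : Int × Int) s =>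
    let runLengths := PySem.Set.ofList (runLens (PySem.List.sorted s.toList (fun c => c) false))
    let c2 := p.1 + (if 2 ∈ runLengths then 1 else 0)
    let c3 := p.2 + (if 3 ∈ runLengths then 1 else 0)
    (c2, c3)) (0, 0)
  p.1 * p.2

-- ===== PRECONDITION & SPEC =====
def Spec_part1 (ids : List String) (out : Int) : Prop := out = part1_alt ids
instance (ids : List String) (out : Int) : Decidable (Spec_part1 ids out) := by unfold Spec_part1; infer_instance

-- ===== CLAIM (what is proved, stated in full; the proofs are below) =====
def Claim_equal_part1 : Prop := ∀ (ids : List String), Dom_part1 ids → Spec_part1 ids (part1 ids)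

-- ===== LEMMAS AND PROOFS =====

-- A-side: k ∈ Counter(l).values ↔ some character of l occurs exactly k times
theorem mem_counter_values (l : List Char) (k : Int) :
    k ∈ (PySem.Dict.counter l).values ↔ ∃ c ∈ l, (l.count c : Int) = k := by
  simp [PySem.Dict.values, PySem.Dict.items_counter, List.mem_map, PySem.Set.mem_ofList]

-- B-side: on a sorted (pairwise ≤) list, the run lengths are exactly the positive counts
theorem mem_runLens (s : List Char) (h : s.Pairwise (· ≤ ·)) (k : Nat) :
    k ∈ runLens s ↔ ∃ c ∈ s, s.count c = k := by
  induction s using runLens.induct with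
  | case1 => simp [runLens]
  | case2 c rest ih =>
    set t := rest.takeWhile (· == c) with ht
    set d := rest.dropWhile (· == c) with hd
    have hrest : t ++ d = rest := List.takeWhile_append_dropWhile
    have hrp : rest.Pairwise (· ≤ ·) := h.of_cons
    have hcle : ∀ x ∈ rest, c ≤ x := fun x hx => List.rel_of_pairwise_cons h hx
    have ht_eq : ∀ x ∈ t, x = c := by
      intro x hx
      have := List.mem_takeWhile_imp hx
      simpa using this
    have hdp : d.Pairwise (· ≤ ·) := hrp.sublist (List.dropWhile_sublist _)
    have hdlt : ∀ x ∈ d, c < x := by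
      intro x hx
      cases hdd : d with
      | nil => simp [hdd] at hx
      | cons y d' =>
        have hy_ne : ¬ (y == c) = true := by
          have := List.head?_dropWhile_not (· == c) rest
          rw [← hd, hdd] at this
          simpa using this
        have hy_mem : y ∈ rest := (List.dropWhile_sublist _).mem (by rw [← hd, hdd]; exact List.mem_cons_self)
        have hcy : c < y := lt_of_le_of_ne (hcle y hy_mem) (by intro e; exact hy_ne (by rw [← e]; exact beq_self_eq_true c))
        rw [hdd] at hx
        rcases List.mem_cons.mp hx with rfl | hx'
        · exact hcy
        · exact lt_of_lt_of_le hcy (List.rel_of_pairwise_cons (hdd ▸ hdp) hx')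
    have hcount_c : (c :: rest).count c = t.length + 1 := by
      rw [List.count_cons_self, ← hrest, List.count_append]
      have h1 : t.count c = t.length := List.count_eq_length.2 (by intro x hx; simp [ht_eq x hx])
      have h2 : d.count c = 0 := List.count_eq_zero.2 (fun hc => lt_irrefl c (hdlt c hc))
      omega
    have hcount_d : ∀ x ∈ d, (c :: rest).count x = d.count x := by
      intro x hx
      have hxc : c ≠ x := fun e => lt_irrefl c (e ▸ hdlt x hx)
      rw [List.count_cons_of_ne hxc, ← hrest, List.count_append]
      have : t.count x = 0 := List.count_eq_zero.2 (fun hc => hxc (ht_eq x hc).symm)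
      omega
    rw [runLens, ← ht, ← hd]
    constructor
    · intro hk
      rcases List.mem_cons.mp hk with rfl | hk'
      · exact ⟨c, List.mem_cons_self, hcount_c⟩
      · rcases (ih hdp).1 hk' with ⟨x, hx, hcnt⟩
        exact ⟨x, List.mem_cons_of_mem _ ((hrest ▸ List.mem_append_right t hx)), by rw [hcount_d x hx]; exact hcnt⟩
    · rintro ⟨x, hx, hcnt⟩
      rcases List.mem_cons.mp hx with rfl | hx'
      · exact List.mem_cons.mpr (Or.inl (by omega))
      · rw [← hrest] at hx'
        rcases List.mem_append.mp hx' with hxt | hxd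
        · have hxe := ht_eq x hxt; subst hxe
          exact List.mem_cons.mpr (Or.inl (by omega))
        · exact List.mem_cons.mpr (Or.inr ((ih hdp).2 ⟨x, hxd, by rw [← hcount_d x hxd]; exact hcnt⟩))

-- bridge: the two membership tests agree on every string
theorem per_string (s : String) (k : Nat) :
    (((k : Int) ∈ (PySem.Dict.counter s.toList).values) ↔
      k ∈ PySem.Set.ofList (runLens (PySem.List.sorted s.toList (fun c => c) false))) := by
  rw [mem_counter_values, PySem.Set.mem_ofList,
      mem_runLens _ (by simpa using PySem.List.sorted_pairwise s.toList (fun c => c))]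
  have hperm : (PySem.List.sorted s.toList (fun c => c) false).Perm s.toList :=
    PySem.List.sorted_perm s.toList (fun c => c) false
  constructor
  · rintro ⟨c, hc, hcnt⟩
    exact ⟨c, hperm.mem_iff.mpr hc, by rw [hperm.count_eq c]; exact_mod_cast hcnt⟩
  · rintro ⟨c, hc, hcnt⟩
    exact ⟨c, hperm.mem_iff.mp hc, by rw [hperm.count_eq c] at hcnt; exact_mod_cast hcnt⟩

theorem step_eq :
    (fun (p : Int × Int) (i : String) =>
      let counter := PySem.Dict.counter i.toList
      let c2 := if (2 : Int) ∈ counter.values then p.1 + 1 else p.1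
      let c3 := if (3 : Int) ∈ counter.values then p.2 + 1 else p.2
      (c2, c3)) =
    (fun (p : Int × Int) (s : String) =>
      let runLengths := PySem.Set.ofList (runLens (PySem.List.sorted s.toList (fun c => c) false))
      let c2 := p.1 + (if 2 ∈ runLengths then 1 else 0)
      let c3 := p.2 + (if 3 ∈ runLengths then 1 else 0)
      (c2, c3)) := by
  funext p s
  have h2 := per_string s 2
  have h3 := per_string s 3
  norm_num at h2 h3
  simp only [PySem.Set.mem_ofList]
  rw [if_congr h2 rfl rfl, if_congr h3 rfl rfl]
  split_ifs <;> simp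

-- ===== VERDICT (by name: the statement is the Claim_ definition above) =====
theorem part1_spec : Claim_equal_part1 := by
  intro ids _
  unfold Spec_part1 part1 part1_alt
  rw [step_eq]
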